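-- pv_equiv track=rewrite | github.com/FahadImdad/Try-Instant-Fit | 00-system/core/nexus/state/state.py | build_display_hints
-- ===== SOURCE A (Python) =====
-- from typing import Any, Dict, List, Optional
--
-- def build_display_hints(
--     update_info: Dict[str, Any],
--     pending_onboarding: List[Dict[str, Any]],
--     goals_personalized: bool,
--     workspace_configured: bool,
-- ) -> List[str]:
--     """
--     Build display hints optimized for orchestrator.md menu rendering.
--
--     These hints map directly to conditional sections in orchestrator.md:
--     - SHOW_UPDATE_BANNER -> Display at top of menu
--     - ONBOARDING_INCOMPLETE -> Emphasize in suggested steps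
--     - Individual skill hints -> Add to numbered suggestions
--
--     Args:
--         update_info: Update check results
--         pending_onboarding: List of incomplete onboarding skills
--         goals_personalized: Whether goals have been personalized
--         workspace_configured: Whether workspace has been configured
--
--     Returns:
--         List of display hint strings matching orchestrator.md patterns
--     """
--     hints = []
--
--     # Update banner (if available)
--     if update_info.get("update_available", False):
--         local_ver = update_info.get("local_version", "unknown")
--         upstream_ver = update_info.get("upstream_version", "latest")
--         hints.append(f"SHOW_UPDATE_BANNER: v{local_ver} -> v{upstream_ver}")
--
--     # Onboarding summary (for emphasis in suggested steps)
--     # NOTE: setup_memory and create_folders removed - quick-start covers both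
--     if pending_onboarding:
--         # Sort by priority
--         priority_order = ["learn_builds", "learn_skills", "learn_integrations", "learn_nexus"]
--         sorted_pending = sorted(pending_onboarding, key=lambda x: priority_order.index(x["key"]) if x["key"] in priority_order else 99)
--
--         hints.append(f"ONBOARDING_INCOMPLETE: {len(pending_onboarding)} skills pending")
--
--         # Add individual skill hints for menu rendering
--         for skill in sorted_pending:
--             skill_key = skill["key"]
--
--             if skill_key == "learn_builds":
--                 hints.append(f"SUGGEST_ONBOARDING: 'learn builds' - understand builds vs skills ({skill['time']})")
--             elif skill_key == "learn_skills":
--                 hints.append(f"SUGGEST_ONBOARDING: 'learn skills' - automate repeating work ({skill['time']})")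
--             elif skill_key == "learn_integrations":
--                 hints.append(f"SUGGEST_ONBOARDING: 'learn integrations' - connect external tools ({skill['time']})")
--             elif skill_key == "learn_nexus":
--                 hints.append(f"SUGGEST_ONBOARDING: 'learn nexus' - deep dive into the system ({skill['time']})")
--
--     return hints
-- ===== SOURCE B (Python) =====
-- def build_display_hints(
--     update_info,
--     pending_onboarding,
--     goals_personalized,
--     workspace_configured,
-- ):
--     """Same hints without sorting: emit skill lines by scanning the fixed
--     priority list, collecting matching pending entries in input order."""
--     hints = []
--
--     if update_info.get("update_available", False):
--         local_ver = update_info.get("local_version", "unknown")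
--         upstream_ver = update_info.get("upstream_version", "latest")
--         hints.append(f"SHOW_UPDATE_BANNER: v{local_ver} -> v{upstream_ver}")
--
--     if pending_onboarding:
--         hints.append(f"ONBOARDING_INCOMPLETE: {len(pending_onboarding)} skills pending")
--
--         templates = {
--             "learn_builds": "SUGGEST_ONBOARDING: 'learn builds' - understand builds vs skills",
--             "learn_skills": "SUGGEST_ONBOARDING: 'learn skills' - automate repeating work",
--             "learn_integrations": "SUGGEST_ONBOARDING: 'learn integrations' - connect external tools",
--             "learn_nexus": "SUGGEST_ONBOARDING: 'learn nexus' - deep dive into the system",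
--         }
--         for pk, tmpl in templates.items():
--             for skill in pending_onboarding:
--                 if skill["key"] == pk:
--                     hints.append(f"{tmpl} ({skill['time']})")
--
--     return hints
-- ===== Notes on version B (the rewrite author's own statement) =====
-- stated objective: alternative
-- what changed: B drops A's sort entirely: instead of sorting pending entries by priority index and dispatching through an if/elif chain, B iterates over a fixed template dict in priority order and scans pending_onboarding in input order for each priority key, which reproduces the stable-sort output order.
import Mathlib
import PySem

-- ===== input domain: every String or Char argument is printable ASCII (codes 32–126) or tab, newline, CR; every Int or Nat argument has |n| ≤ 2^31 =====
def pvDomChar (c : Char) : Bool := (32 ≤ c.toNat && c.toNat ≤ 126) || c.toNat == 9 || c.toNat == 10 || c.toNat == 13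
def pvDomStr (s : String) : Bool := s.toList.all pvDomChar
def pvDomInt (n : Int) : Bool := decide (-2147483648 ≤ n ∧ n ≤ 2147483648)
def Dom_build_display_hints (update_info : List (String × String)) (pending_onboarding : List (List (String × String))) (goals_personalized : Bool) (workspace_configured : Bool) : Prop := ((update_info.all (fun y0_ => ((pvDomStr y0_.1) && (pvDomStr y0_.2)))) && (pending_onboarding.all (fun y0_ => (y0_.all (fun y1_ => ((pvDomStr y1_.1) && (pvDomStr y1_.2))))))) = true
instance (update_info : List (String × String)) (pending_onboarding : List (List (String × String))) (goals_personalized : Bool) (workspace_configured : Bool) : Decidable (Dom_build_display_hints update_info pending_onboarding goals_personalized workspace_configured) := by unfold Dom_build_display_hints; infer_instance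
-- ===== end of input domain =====

-- B drops A's sort: it walks the fixed priority/template list in order and scans
-- pending_onboarding in input order per priority key (same output, no sort).

-- ===== PORT A =====
-- skill["key"] / skill["time"]: under Pre_ these keys exist, so the total getD is exact.
def pvKey (skill : List (String × String)) : String := PySem.Dict.getD (PySem.Dict.mk skill) "key" ""
def pvTime (skill : List (String × String)) : String := PySem.Dict.getD (PySem.Dict.mk skill) "time" ""
def pvPrio : List String := ["learn_builds", "learn_skills", "learn_integrations", "learn_nexus"]
-- priority_order.index(x["key"]) if x["key"] in priority_order else 99
def pvPrioIdx (skill : List (String × String)) : Int :=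
  match PySem.List.index? pvPrio (pvKey skill) with
  | some n => (n : Int)
  | none => 99

def build_display_hints (update_info : List (String × String)) (pending_onboarding : List (List (String × String))) (goals_personalized : Bool) (workspace_configured : Bool) : List String :=
  let hints : List String := []
  -- truthiness of update_info.get("update_available", False): a present non-empty string
  let hints := if ((PySem.Dict.get? (PySem.Dict.mk update_info) "update_available").getD "") ≠ "" then
      hints ++ ["SHOW_UPDATE_BANNER: v" ++ PySem.Dict.getD (PySem.Dict.mk update_info) "local_version" "unknown"
                ++ " -> v" ++ PySem.Dict.getD (PySem.Dict.mk update_info) "upstream_version" "latest"]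
    else hints
  if pending_onboarding.isEmpty then hints
  else
    let sorted_pending := PySem.List.sorted pending_onboarding pvPrioIdx
    let hints := hints ++ ["ONBOARDING_INCOMPLETE: " ++ PySem.Int.toStr (pending_onboarding.length : Int) ++ " skills pending"]
    sorted_pending.foldl (fun acc skill =>
      if pvKey skill == "learn_builds" then
        acc ++ ["SUGGEST_ONBOARDING: 'learn builds' - understand builds vs skills (" ++ pvTime skill ++ ")"]
      else if pvKey skill == "learn_skills" then
        acc ++ ["SUGGEST_ONBOARDING: 'learn skills' - automate repeating work (" ++ pvTime skill ++ ")"]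
      else if pvKey skill == "learn_integrations" then
        acc ++ ["SUGGEST_ONBOARDING: 'learn integrations' - connect external tools (" ++ pvTime skill ++ ")"]
      else if pvKey skill == "learn_nexus" then
        acc ++ ["SUGGEST_ONBOARDING: 'learn nexus' - deep dive into the system (" ++ pvTime skill ++ ")"]
      else acc) hints

-- ===== PORT B =====
def pvTemplates : List (String × String) :=
  [("learn_builds", "SUGGEST_ONBOARDING: 'learn builds' - understand builds vs skills"),
   ("learn_skills", "SUGGEST_ONBOARDING: 'learn skills' - automate repeating work"),
   ("learn_integrations", "SUGGEST_ONBOARDING: 'learn integrations' - connect external tools"),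
   ("learn_nexus", "SUGGEST_ONBOARDING: 'learn nexus' - deep dive into the system")]

def build_display_hints_alt (update_info : List (String × String)) (pending_onboarding : List (List (String × String))) (goals_personalized : Bool) (workspace_configured : Bool) : List String :=
  let hints : List String := []
  let hints := if ((PySem.Dict.get? (PySem.Dict.mk update_info) "update_available").getD "") ≠ "" then
      hints ++ ["SHOW_UPDATE_BANNER: v" ++ PySem.Dict.getD (PySem.Dict.mk update_info) "local_version" "unknown"
                ++ " -> v" ++ PySem.Dict.getD (PySem.Dict.mk update_info) "upstream_version" "latest"]
    else hints
  if pending_onboarding.isEmpty then hints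
  else
    let hints := hints ++ ["ONBOARDING_INCOMPLETE: " ++ PySem.Int.toStr (pending_onboarding.length : Int) ++ " skills pending"]
    pvTemplates.foldl (fun acc pt =>
      pending_onboarding.foldl (fun acc2 skill =>
        if pvKey skill == pt.1 then acc2 ++ [pt.2 ++ " (" ++ pvTime skill ++ ")"] else acc2) acc) hints

-- ===== PRECONDITION & SPEC =====
-- Pre_ excludes exactly the inputs where A raises KeyError: a pending entry with no
-- "key", or an entry whose key is one of the four priority keys but has no "time".
def Pre_build_display_hints (update_info : List (String × String)) (pending_onboarding : List (List (String × String))) (goals_personalized : Bool) (workspace_configured : Bool) : Prop :=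
  ∀ skill ∈ pending_onboarding,
    (PySem.Dict.get? (PySem.Dict.mk skill) "key").isSome = true ∧
    ((PySem.Dict.get? (PySem.Dict.mk skill) "key").getD "" ∈ (["learn_builds", "learn_skills", "learn_integrations", "learn_nexus"] : List String) →
      (PySem.Dict.get? (PySem.Dict.mk skill) "time").isSome = true)
instance (update_info : List (String × String)) (pending_onboarding : List (List (String × String))) (goals_personalized : Bool) (workspace_configured : Bool) : Decidable (Pre_build_display_hints update_info pending_onboarding goals_personalized workspace_configured) := by unfold Pre_build_display_hints; infer_instance

def pvWitness_build_display_hints : (List (String × String)) × (List (List (String × String))) × Bool × Bool :=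
  ([("update_available", "yes"), ("local_version", "1.0")],
   [[("key", "learn_nexus"), ("time", "5m")], [("key", "other")], [("key", "learn_builds"), ("time", "10m")]],
   true, false)

def Spec_build_display_hints (update_info : List (String × String)) (pending_onboarding : List (List (String × String))) (goals_personalized : Bool) (workspace_configured : Bool) (out : List String) : Prop := out = build_display_hints_alt update_info pending_onboarding goals_personalized workspace_configured
instance (update_info : List (String × String)) (pending_onboarding : List (List (String × String))) (goals_personalized : Bool) (workspace_configured : Bool) (out : List String) : Decidable (Spec_build_display_hints update_info pending_onboarding goals_personalized workspace_configured out) := by unfold Spec_build_display_hints; infer_instance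

-- ===== CLAIM (what is proved, stated in full; the proofs are below) =====
def Claim_equal_build_display_hints : Prop := ∀ (update_info : List (String × String)) (pending_onboarding : List (List (String × String))) (goals_personalized : Bool) (workspace_configured : Bool), Dom_build_display_hints update_info pending_onboarding goals_personalized workspace_configured → Pre_build_display_hints update_info pending_onboarding goals_personalized workspace_configured → Spec_build_display_hints update_info pending_onboarding goals_personalized workspace_configured (build_display_hints update_info pending_onboarding goals_personalized workspace_configured)

-- ===== LEMMAS AND PROOFS =====

lemma pvPrioIdx_eq (s : List (String × String)) :
    pvPrioIdx s = (if pvKey s = "learn_builds" then 0 else if pvKey s = "learn_skills" then 1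
      else if pvKey s = "learn_integrations" then 2 else if pvKey s = "learn_nexus" then 3 else 99) := by
  unfold pvPrioIdx pvPrio
  split_ifs with h1 h2 h3 h4
  · rw [h1]; rfl
  · rw [h2]; rfl
  · rw [h3]; rfl
  · rw [h4]; rfl
  · rw [(PySem.List.index?_eq_none_iff _ _).2 (by simp [h1, h2, h3, h4] : pvKey s ∉ (["learn_builds", "learn_skills", "learn_integrations", "learn_nexus"] : List String))]

def pvK (k : String) (xs : List (List (String × String))) : List (List (String × String)) :=
  xs.filter (fun s => pvKey s == k)
def pvKother (xs : List (List (String × String))) : List (List (String × String)) :=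
  xs.filter (fun s => !(pvPrio.contains (pvKey s)))

lemma mem_pvK {k : String} {y : List (String × String)} {xs : List (List (String × String))}
    (hy : y ∈ pvK k xs) : pvKey y = k := by
  simp [pvK, List.mem_filter] at hy; exact hy.2

lemma mem_pvKother {y : List (String × String)} {xs : List (List (String × String))}
    (hy : y ∈ pvKother xs) : pvPrioIdx y = 99 := by
  simp [pvKother, List.mem_filter, pvPrio] at hy
  rw [pvPrioIdx_eq]
  simp [hy.2.1, hy.2.2.1, hy.2.2.2.1, hy.2.2.2.2]

lemma prioK {k : String} {y : List (String × String)} {xs : List (List (String × String))}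
    (hy : y ∈ pvK k xs) :
    (k = "learn_builds" → pvPrioIdx y = 0) ∧ (k = "learn_skills" → pvPrioIdx y = 1) ∧
    (k = "learn_integrations" → pvPrioIdx y = 2) ∧ (k = "learn_nexus" → pvPrioIdx y = 3) := by
  have h := mem_pvK hy
  refine ⟨?_, ?_, ?_, ?_⟩ <;> intro hk <;> rw [pvPrioIdx_eq] <;> subst hk <;> simp [h]

lemma insertBy_append_left {α : Type} (before : α → α → Bool) (x : α) (l r : List α)
    (h : ∀ y ∈ l, before x y = false) :
    PySem.List.insertBy before x (l ++ r) = l ++ PySem.List.insertBy before x r := by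
  induction l with
  | nil => simp
  | cons a t ih =>
      simp only [List.cons_append, PySem.List.insertBy, h a (by simp)]
      simp only [Bool.false_eq_true, if_false, List.cons.injEq, true_and]
      exact ih (fun y hy => h y (by simp [hy]))

lemma insertBy_all_before {α : Type} (before : α → α → Bool) (x : α) (r : List α)
    (h : ∀ y ∈ r, before x y = true) :
    PySem.List.insertBy before x r = x :: r := by
  cases r with
  | nil => rfl
  | cons a t => simp [PySem.List.insertBy, h a (by simp)]

lemma pv_group (xs : List (List (String × String))) :
    xs.foldl (fun acc x => PySem.List.insertBy (fun a b => decide (pvPrioIdx a < pvPrioIdx b)) x acc) [] =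
      pvK "learn_builds" xs ++ pvK "learn_skills" xs ++ pvK "learn_integrations" xs ++ pvK "learn_nexus" xs ++ pvKother xs := by
  induction xs using List.reverseRecOn with
  | nil => rfl
  | append_singleton xs x ih =>
    rw [List.foldl_append, List.foldl_cons, List.foldl_nil, ih]
    have hK : ∀ k, pvK k (xs ++ [x]) = pvK k xs ++ (if pvKey x == k then [x] else []) := by
      intro k; simp only [pvK, List.filter_append]; cases h : pvKey x == k <;> simp [List.filter, h]
    have hO : pvKother (xs ++ [x]) = pvKother xs ++ (if !(pvPrio.contains (pvKey x)) then [x] else []) := by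
      simp only [pvKother, List.filter_append]; by_cases h : pvKey x ∈ pvPrio <;> simp [List.filter, h]
    rw [hK, hK, hK, hK, hO]
    simp only [List.append_assoc]
    have pK0 : ∀ y ∈ pvK "learn_builds" xs, pvPrioIdx y = 0 := fun y hy => (prioK hy).1 rfl
    have pK1 : ∀ y ∈ pvK "learn_skills" xs, pvPrioIdx y = 1 := fun y hy => (prioK hy).2.1 rfl
    have pK2 : ∀ y ∈ pvK "learn_integrations" xs, pvPrioIdx y = 2 := fun y hy => (prioK hy).2.2.1 rfl
    have pK3 : ∀ y ∈ pvK "learn_nexus" xs, pvPrioIdx y = 3 := fun y hy => (prioK hy).2.2.2 rfl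
    have pKo : ∀ y ∈ pvKother xs, pvPrioIdx y = 99 := fun _ hy => mem_pvKother hy
    by_cases h1 : pvKey x = "learn_builds"
    · have hx : pvPrioIdx x = 0 := by rw [pvPrioIdx_eq]; simp [h1]
      rw [insertBy_append_left _ _ _ _ (fun y hy => by simp [hx, pK0 y hy]),
          insertBy_all_before _ _ _ (fun y hy => by
            simp only [List.mem_append] at hy
            rcases hy with hy | hy | hy | hy
            · simp [hx, pK1 y hy]
            · simp [hx, pK2 y hy]
            · simp [hx, pK3 y hy]
            · simp [hx, pKo y hy])]
      simp [h1, pvPrio]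
    · by_cases h2 : pvKey x = "learn_skills"
      · have hx : pvPrioIdx x = 1 := by rw [pvPrioIdx_eq]; simp [h1, h2]
        rw [insertBy_append_left _ _ _ _ (fun y hy => by simp [hx, pK0 y hy]),
            insertBy_append_left _ _ _ _ (fun y hy => by simp [hx, pK1 y hy]),
            insertBy_all_before _ _ _ (fun y hy => by
              simp only [List.mem_append] at hy
              rcases hy with hy | hy | hy
              · simp [hx, pK2 y hy]
              · simp [hx, pK3 y hy]
              · simp [hx, pKo y hy])]
        simp [h1, h2, pvPrio]
      · by_cases h3 : pvKey x = "learn_integrations"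
        · have hx : pvPrioIdx x = 2 := by rw [pvPrioIdx_eq]; simp [h1, h2, h3]
          rw [insertBy_append_left _ _ _ _ (fun y hy => by simp [hx, pK0 y hy]),
              insertBy_append_left _ _ _ _ (fun y hy => by simp [hx, pK1 y hy]),
              insertBy_append_left _ _ _ _ (fun y hy => by simp [hx, pK2 y hy]),
              insertBy_all_before _ _ _ (fun y hy => by
                simp only [List.mem_append] at hy
                rcases hy with hy | hy
                · simp [hx, pK3 y hy]
                · simp [hx, pKo y hy])]
          simp [h1, h2, h3, pvPrio]
        · by_cases h4 : pvKey x = "learn_nexus"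
          · have hx : pvPrioIdx x = 3 := by rw [pvPrioIdx_eq]; simp [h1, h2, h3, h4]
            rw [insertBy_append_left _ _ _ _ (fun y hy => by simp [hx, pK0 y hy]),
                insertBy_append_left _ _ _ _ (fun y hy => by simp [hx, pK1 y hy]),
                insertBy_append_left _ _ _ _ (fun y hy => by simp [hx, pK2 y hy]),
                insertBy_append_left _ _ _ _ (fun y hy => by simp [hx, pK3 y hy]),
                insertBy_all_before _ _ _ (fun y hy => by simp [hx, pKo y hy])]
            simp [h1, h2, h3, h4, pvPrio]
          · have hx : pvPrioIdx x = 99 := by rw [pvPrioIdx_eq]; simp [h1, h2, h3, h4]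
            rw [PySem.List.insertBy_of_forall_not_before _ _ _ (fun y hy => by
              simp only [List.mem_append] at hy
              rcases hy with hy | hy | hy | hy | hy
              · simp [hx, pK0 y hy]
              · simp [hx, pK1 y hy]
              · simp [hx, pK2 y hy]
              · simp [hx, pK3 y hy]
              · simp [hx, pKo y hy])]
            simp [h1, h2, h3, h4, pvPrio]

-- A's loop body emits these lines per skill
def pvEmitA (s : List (String × String)) : List String :=
  if pvKey s == "learn_builds" then
    ["SUGGEST_ONBOARDING: 'learn builds' - understand builds vs skills (" ++ pvTime s ++ ")"]
  else if pvKey s == "learn_skills" then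
    ["SUGGEST_ONBOARDING: 'learn skills' - automate repeating work (" ++ pvTime s ++ ")"]
  else if pvKey s == "learn_integrations" then
    ["SUGGEST_ONBOARDING: 'learn integrations' - connect external tools (" ++ pvTime s ++ ")"]
  else if pvKey s == "learn_nexus" then
    ["SUGGEST_ONBOARDING: 'learn nexus' - deep dive into the system (" ++ pvTime s ++ ")"]
  else []

lemma flatMap_congr_mem {α β : Type} {f g : α → List β} (l : List α)
    (h : ∀ x ∈ l, f x = g x) : l.flatMap f = l.flatMap g := by
  induction l with
  | nil => rfl
  | cons a t ih => simp only [List.flatMap_cons, h a (by simp), ih (fun x hx => h x (by simp [hx]))]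

lemma flatMap_singleton_map {α β : Type} (l : List α) (f : α → β) :
    l.flatMap (fun s => [f s]) = l.map f := by
  induction l with
  | nil => rfl
  | cons a t ih => simp [ih]

lemma pvEmitA_on (k : String) (tmpl : String) (xs : List (List (String × String)))
    (htm : ∀ s : List (String × String), pvKey s = k → pvEmitA s = [tmpl ++ " (" ++ pvTime s ++ ")"]) :
    (pvK k xs).flatMap pvEmitA = (pvK k xs).map (fun s => tmpl ++ " (" ++ pvTime s ++ ")") := by
  rw [flatMap_congr_mem _ (fun s hs => htm s (mem_pvK hs))]
  exact flatMap_singleton_map _ _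

lemma pvEmitA_other (xs : List (List (String × String))) :
    (pvKother xs).flatMap pvEmitA = [] := by
  rw [flatMap_congr_mem (g := fun _ => []) _ ?_]
  · simp
  · intro s hs
    have h := mem_pvKother hs
    rw [pvPrioIdx_eq] at h
    unfold pvEmitA
    split_ifs at h ⊢ <;> simp_all

theorem build_display_hints_spec : Claim_equal_build_display_hints := by
  unfold Claim_equal_build_display_hints Spec_build_display_hints
  intro update_info pending g w _ _
  unfold build_display_hints build_display_hints_alt
  cases hp : pending.isEmpty
  · simp only [hp, Bool.false_eq_true, if_false]
    rw [PySem.List.sorted_eq_foldl_insertBy, pv_group]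
    have hbody : (fun (acc : List String) skill =>
        if pvKey skill == "learn_builds" then
          acc ++ ["SUGGEST_ONBOARDING: 'learn builds' - understand builds vs skills (" ++ pvTime skill ++ ")"]
        else if pvKey skill == "learn_skills" then
          acc ++ ["SUGGEST_ONBOARDING: 'learn skills' - automate repeating work (" ++ pvTime skill ++ ")"]
        else if pvKey skill == "learn_integrations" then
          acc ++ ["SUGGEST_ONBOARDING: 'learn integrations' - connect external tools (" ++ pvTime skill ++ ")"]
        else if pvKey skill == "learn_nexus" then
          acc ++ ["SUGGEST_ONBOARDING: 'learn nexus' - deep dive into the system (" ++ pvTime skill ++ ")"]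
        else acc) = fun acc s => acc ++ pvEmitA s := by
      funext acc s
      unfold pvEmitA
      split_ifs <;> simp
    rw [hbody, PySem.List.foldl_append_eq_flatMap]
    simp only [List.flatMap_append]
    rw [pvEmitA_on "learn_builds" "SUGGEST_ONBOARDING: 'learn builds' - understand builds vs skills" _
          (fun s h => by unfold pvEmitA; rw [h]; rfl),
        pvEmitA_on "learn_skills" "SUGGEST_ONBOARDING: 'learn skills' - automate repeating work" _
          (fun s h => by unfold pvEmitA; rw [h]; rfl),
        pvEmitA_on "learn_integrations" "SUGGEST_ONBOARDING: 'learn integrations' - connect external tools" _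
          (fun s h => by unfold pvEmitA; rw [h]; rfl),
        pvEmitA_on "learn_nexus" "SUGGEST_ONBOARDING: 'learn nexus' - deep dive into the system" _
          (fun s h => by unfold pvEmitA; rw [h]; rfl),
        pvEmitA_other]
    simp only [pvTemplates, List.foldl_cons, List.foldl_nil, PySem.List.foldl_append_if]
    simp [pvK, List.append_assoc]
  · rfl

-- ===== VERDICT (by name: the statement is the Claim_ definition above; proved directly above) =====
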